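-- pv_equiv track=rewrite | github.com/Fitruong02/ChineseLearning | pipeline/src/chinese_flashcards/dictionary.py | _convert_syllable
-- ===== SOURCE A (Python) =====
-- VOWEL_PRIORITY = "aAeEoO"
--
-- TONE_MARKS = {
--     "a": "āáǎà",
--     "e": "ēéěè",
--     "i": "īíǐì",
--     "o": "ōóǒò",
--     "u": "ūúǔù",
--     "ü": "ǖǘǚǜ",
--     "A": "ĀÁǍÀ",
--     "E": "ĒÉĚÈ",
--     "I": "ĪÍǏÌ",
--     "O": "ŌÓǑÒ",
--     "U": "ŪÚǓÙ",
--     "Ü": "ǕǗǙǛ",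
-- }
--
-- def _convert_syllable(syllable: str) -> str:
--     if not syllable:
--         return syllable
--
--     tone = syllable[-1]
--
--     if not tone.isdigit():
--         return syllable.replace("u:", "ü").replace("v", "ü")
--
--     body = syllable[:-1].replace("u:", "ü").replace("v", "ü")
--
--     if tone == "5" or tone == "0":
--         return body
--
--     tone_index = int(tone) - 1
--     target_index = -1
--
--     for vowel in VOWEL_PRIORITY:
--         target_index = body.find(vowel)
--         if target_index != -1:
--             break
--
--     if target_index == -1 and "ou" in body:
--         target_index = body.find("o")
--
--     if target_index == -1:
--         for index, character in enumerate(body):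
--             if character.lower() in {"i", "u", "ü"}:
--                 target_index = index
--
--     if target_index == -1:
--         return body
--
--     vowel = body[target_index]
--     marked = TONE_MARKS.get(vowel, vowel * 4)[tone_index]
--     return f"{body[:target_index]}{marked}{body[target_index + 1:]}"
-- ===== SOURCE B (Python) =====
-- VOWEL_PRIORITY = "aAeEoO"
--
-- TONE_MARKS = {
--     "a": "āáǎà",
--     "e": "ēéěè",
--     "i": "īíǐì",
--     "o": "ōóǒò",
--     "u": "ūúǔù",
--     "ü": "ǖǘǚǜ",
--     "A": "ĀÁǍÀ",
--     "E": "ĒÉĚÈ",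
--     "I": "ĪÍǏÌ",
--     "O": "ŌÓǑÒ",
--     "U": "ŪÚǓÙ",
--     "Ü": "ǕǗǙǛ",
-- }
--
-- _RANK = {"a": 0, "A": 1, "e": 2, "E": 3, "o": 4, "O": 5}
--
--
-- def _convert_syllable(syllable: str) -> str:
--     if not syllable:
--         return syllable
--
--     tone = syllable[-1]
--
--     if not tone.isdigit():
--         return syllable.replace("u:", "ü").replace("v", "ü")
--
--     body = syllable[:-1].replace("u:", "ü").replace("v", "ü")
--
--     if tone == "5" or tone == "0":
--         return body
--
--     # One pass: best (lowest-rank, earliest) priority vowel and last i/u/ü index.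
--     best_rank = 6
--     best_index = -1
--     last_iuv = -1
--     for index, character in enumerate(body):
--         rank = _RANK.get(character, 6)
--         if rank < best_rank:
--             best_rank = rank
--             best_index = index
--         if character.lower() in {"i", "u", "ü"}:
--             last_iuv = index
--
--     target_index = best_index if best_index != -1 else last_iuv
--     if target_index == -1:
--         return body
--
--     tone_index = int(tone) - 1
--     vowel = body[target_index]
--     marked = TONE_MARKS.get(vowel, vowel * 4)[tone_index]
--     return f"{body[:target_index]}{marked}{body[target_index + 1:]}"
-- ===== Notes on version B (the rewrite author's own statement) =====
-- stated objective: alternative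
-- what changed: A's three sequential scans for the target vowel (up to six body.find() calls over VOWEL_PRIORITY, an 'ou' check, and an enumerate pass for the last i/u/ü) are replaced by one left-to-right pass over body that maintains the best priority-vowel (lowest rank, earliest) index and the last i/u/ü index; preamble and tone marking are unchanged.
import Mathlib
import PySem

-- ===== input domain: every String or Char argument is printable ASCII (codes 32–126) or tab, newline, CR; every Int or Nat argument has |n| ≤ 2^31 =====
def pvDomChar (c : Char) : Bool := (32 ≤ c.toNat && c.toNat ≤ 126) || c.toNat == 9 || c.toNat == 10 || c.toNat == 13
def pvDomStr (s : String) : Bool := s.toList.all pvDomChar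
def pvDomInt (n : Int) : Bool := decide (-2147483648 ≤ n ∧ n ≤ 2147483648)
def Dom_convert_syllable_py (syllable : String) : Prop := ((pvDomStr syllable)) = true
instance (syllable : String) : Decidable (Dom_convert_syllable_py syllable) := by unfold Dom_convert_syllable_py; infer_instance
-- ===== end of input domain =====

-- B replaces A's three sequential scans for the target vowel (six find() calls, an "ou"
-- check and an enumerate loop) by ONE left-to-right pass that tracks the best priority
-- vowel (lowest rank a>A>e>E>o>O, earliest) and the last i/u/ü index; preamble and tone
-- marking are unchanged.  Equality is of return values (no mutation in either program).

-- ===== PORT A =====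
def pvVOWEL_PRIORITY : List Char := ['a', 'A', 'e', 'E', 'o', 'O']

def pvTONE_MARKS : List (Char × List Char) :=
  [('a', "āáǎà".toList), ('e', "ēéěè".toList), ('i', "īíǐì".toList),
   ('o', "ōóǒò".toList), ('u', "ūúǔù".toList), ('ü', "ǖǘǚǜ".toList),
   ('A', "ĀÁǍÀ".toList), ('E', "ĒÉĚÈ".toList), ('I', "ĪÍǏÌ".toList),
   ('O', "ŌÓǑÒ".toList), ('U', "ŪÚǓÙ".toList), ('Ü', "ǕǗǙǛ".toList)]

-- the 'for vowel in VOWEL_PRIORITY: target_index = body.find(vowel); if != -1: break' loop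
def pvPrioScan (body : List Char) : List Char → Int
  | [] => -1
  | v :: rest =>
    let t := PySem.Chars.find body [v]
    if t ≠ -1 then t else pvPrioScan body rest

def convert_syllable_py (syllable : String) : String :=
  let s := syllable.toList
  if s = [] then syllable
  else
    let tone := PySem.List.pyGetD s (-1) ' '
    if ¬ (PySem.Chars.isdigit tone = true) then
      String.ofList (PySem.Chars.replace (PySem.Chars.replace s "u:".toList "ü".toList) "v".toList "ü".toList)
    else
      let body := PySem.Chars.replace (PySem.Chars.replace (PySem.List.slice s none (some (-1))) "u:".toList "ü".toList) "v".toList "ü".toList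
      if tone = '5' ∨ tone = '0' then String.ofList body
      else
        let tone_index := (PySem.Int.ofChars? [tone]).getD 0 - 1
        let target1 := pvPrioScan body pvVOWEL_PRIORITY
        let target2 := if target1 = -1 ∧ PySem.Chars.isIn "ou".toList body then PySem.Chars.find body ['o'] else target1
        let target3 := if target2 = -1 then
            (PySem.List.enumerate body 0).foldl
              (fun acc p => if ['i', 'u', 'ü'].contains (PySem.Chars.lowerChar p.2) then p.1 else acc) (-1)
          else target2
        if target3 = -1 then String.ofList body
        else
          let vowel := PySem.List.pyGetD body target3 ' '
          let marked := PySem.List.pyGetD ((pvTONE_MARKS.lookup vowel).getD (List.replicate 4 vowel)) tone_index ' '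
          String.ofList (PySem.List.slice body none (some target3) ++ [marked] ++ PySem.List.slice body (some (target3 + 1)) none)

-- ===== PORT B =====
def pvRANK : List (Char × Nat) := [('a', 0), ('A', 1), ('e', 2), ('E', 3), ('o', 4), ('O', 5)]

def convert_syllable_py_alt (syllable : String) : String :=
  let s := syllable.toList
  if s = [] then syllable
  else
    let tone := PySem.List.pyGetD s (-1) ' '
    if ¬ (PySem.Chars.isdigit tone = true) then
      String.ofList (PySem.Chars.replace (PySem.Chars.replace s "u:".toList "ü".toList) "v".toList "ü".toList)
    else
      let body := PySem.Chars.replace (PySem.Chars.replace (PySem.List.slice s none (some (-1))) "u:".toList "ü".toList) "v".toList "ü".toList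
      if tone = '5' ∨ tone = '0' then String.ofList body
      else
        -- one pass: ((best_rank, best_index), last_iuv)
        let st := (PySem.List.enumerate body 0).foldl
          (fun (acc : (Nat × Int) × Int) p =>
            ((if (pvRANK.lookup p.2).getD 6 < acc.1.1 then ((pvRANK.lookup p.2).getD 6, p.1) else acc.1),
             (if ['i', 'u', 'ü'].contains (PySem.Chars.lowerChar p.2) then p.1 else acc.2)))
          ((6, -1), -1)
        let target := if st.1.2 ≠ -1 then st.1.2 else st.2
        if target = -1 then String.ofList body
        else
          let tone_index := (PySem.Int.ofChars? [tone]).getD 0 - 1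
          let vowel := PySem.List.pyGetD body target ' '
          let marked := PySem.List.pyGetD ((pvTONE_MARKS.lookup vowel).getD (List.replicate 4 vowel)) tone_index ' '
          String.ofList (PySem.List.slice body none (some target) ++ [marked] ++ PySem.List.slice body (some (target + 1)) none)

-- ===== PRECONDITION & SPEC =====
-- Pre_ excludes exactly the inputs where Python A raises IndexError: a syllable whose last
-- character is a digit 6..9 and whose body contains a markable vowel letter (a/e/o/i/u in
-- either case, or v / "u:" which normalize to ü) — tone_index ≥ 5 then indexes past the
-- 4-character tone-mark string.
def Pre_convert_syllable_py (syllable : String) : Prop :=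
  ¬ (syllable.toList ≠ [] ∧
     syllable.toList.getLast? ∈ [some '6', some '7', some '8', some '9'] ∧
     ∃ c ∈ syllable.toList.dropLast, c ∈ ['a', 'A', 'e', 'E', 'o', 'O', 'i', 'I', 'u', 'U', 'v'])
instance (syllable : String) : Decidable (Pre_convert_syllable_py syllable) := by unfold Pre_convert_syllable_py; infer_instance

def pvWitness_convert_syllable_py : String := "nu:3"

def Spec_convert_syllable_py (syllable : String) (out : String) : Prop := out = convert_syllable_py_alt syllable
instance (syllable : String) (out : String) : Decidable (Spec_convert_syllable_py syllable out) := by unfold Spec_convert_syllable_py; infer_instance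

-- ===== CLAIM (what is proved, stated in full; the proofs are below) =====
def Claim_equal_convert_syllable_py : Prop := ∀ (syllable : String), Dom_convert_syllable_py syllable → Pre_convert_syllable_py syllable → Spec_convert_syllable_py syllable (convert_syllable_py syllable)

-- ===== LEMMAS AND PROOFS =====

def pvRd (c : Char) : Nat := (pvRANK.lookup c).getD 6
def pvVch : Nat → Char
  | 0 => 'a' | 1 => 'A' | 2 => 'e' | 3 => 'E' | 4 => 'o' | _ => 'O'
def pvMrb (body : List Char) (br : Nat) : Nat :=
  body.foldl (fun m c => if pvRd c < m then pvRd c else m) br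
theorem pvRd_le_6 (c : Char) : pvRd c ≤ 6 := by
  simp only [pvRd, pvRANK, List.lookup]
  repeat' split
  all_goals simp
theorem pvRd_lt_6_iff (c : Char) (m : Nat) (hm : m < 6) : pvRd c = m ↔ c = pvVch m := by
  interval_cases m <;>
  · simp only [pvRd, pvRANK, List.lookup, pvVch]
    repeat' split
    all_goals simp_all
theorem pvRd_vch (m : Nat) (hm : m < 6) : pvRd (pvVch m) = m := by
  interval_cases m <;> decide
theorem pvMrb_le (body : List Char) (br : Nat) : pvMrb body br ≤ br := by
  induction body generalizing br with
  | nil => simp [pvMrb]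
  | cons c t ih =>
    simp only [pvMrb, List.foldl_cons] at *
    split <;> [exact le_trans (ih _) (by omega); exact ih _]
theorem pvMrb_cons (c : Char) (t : List Char) (br : Nat) :
    pvMrb (c :: t) br = pvMrb t (if pvRd c < br then pvRd c else br) := by
  simp only [pvMrb, List.foldl_cons]
theorem pvMrb_le_of_mem (body : List Char) (br : Nat) (c : Char) (hc : c ∈ body) :
    pvMrb body br ≤ pvRd c := by
  induction body generalizing br with
  | nil => simp at hc
  | cons d t ih =>
    simp only [pvMrb, List.foldl_cons]
    rcases List.mem_cons.mp hc with h | h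
    · subst h
      split
      · exact le_trans (pvMrb_le t _) (by omega)
      · exact le_trans (pvMrb_le t _) (by omega)
    · split <;> exact ih _ h
theorem pvMrb_mem (body : List Char) (br : Nat) (hbr : br ≤ 6) (h : pvMrb body br < br) :
    pvVch (pvMrb body br) ∈ body := by
  induction body generalizing br with
  | nil => simp [pvMrb] at h
  | cons c t ih =>
    rw [pvMrb_cons] at h ⊢
    by_cases hlt : pvMrb t (if pvRd c < br then pvRd c else br) < (if pvRd c < br then pvRd c else br)
    · exact List.mem_cons_of_mem _ (ih _ (by have := pvRd_le_6 c; split <;> omega) hlt)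
    · have heq : pvMrb t (if pvRd c < br then pvRd c else br) = (if pvRd c < br then pvRd c else br) :=
        le_antisymm (pvMrb_le t _) (not_lt.mp hlt)
      rw [heq] at h ⊢
      by_cases hrc : pvRd c < br
      · rw [if_pos hrc] at h ⊢
        have hcv : c = pvVch (pvRd c) := (pvRd_lt_6_iff c (pvRd c) (by omega)).mp rfl
        rw [← hcv]
        exact List.mem_cons_self
      · rw [if_neg hrc] at h; omega
theorem pvIdxOf_eq_of (v : Char) (l : List Char) (n : Nat) (h1 : l[n]? = some v)
    (h2 : ∀ i < n, l[i]? ≠ some v) : l.idxOf v = n := by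
  induction l generalizing n with
  | nil => simp at h1
  | cons c t ih =>
    cases n with
    | zero => simp_all
    | succ m =>
      have hc : (c == v) = false := by
        simp only [beq_eq_false_iff_ne, ne_eq]
        intro h; exact h2 0 (by omega) (by simp [h])
      simp only [List.idxOf_cons, hc, cond_false]
      rw [ih m (by simpa using h1) (fun i hi => by simpa using h2 (i+1) (by omega))]
theorem pvSingleton_prefix_iff (v : Char) (l : List Char) : ([v] <+: l) ↔ l[0]? = some v := by
  cases l with
  | nil => simp
  | cons c t =>
    simp only [List.getElem?_cons_zero, Option.some.injEq]
    constructor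
    · rintro ⟨s, hs⟩
      rw [List.singleton_append] at hs
      injection hs with h1 h2
      exact h1.symm
    · rintro rfl; exact ⟨t, rfl⟩
theorem pvFind_singleton (body : List Char) (v : Char) :
    PySem.Chars.find body [v] = if v ∈ body then (List.idxOf v body : Int) else -1 := by
  by_cases h : v ∈ body
  · have hnn : 0 ≤ PySem.Chars.find body [v] :=
      (PySem.Chars.find_nonneg_iff _ _).mpr ((List.singleton_infix_iff v body).mpr h)
    obtain ⟨hpre, hmin⟩ := PySem.Chars.find_spec hnn
    rw [if_pos h]
    have hidx : body.idxOf v = (PySem.Chars.find body [v]).toNat := by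
      apply pvIdxOf_eq_of
      · have := (pvSingleton_prefix_iff v _).mp hpre
        simpa [List.getElem?_drop] using this
      · intro i hi hv
        exact hmin i hi ((pvSingleton_prefix_iff v _).mpr (by simpa [List.getElem?_drop] using hv))
    rw [hidx]; omega
  · rw [if_neg h, (PySem.Chars.find_eq_neg_one_iff _ _)]
    rw [List.singleton_infix_iff]; exact h
theorem pvFoldP (body : List Char) (k : Int) (br : Nat) (bi : Int) (hbr : br ≤ 6) :
    (PySem.List.enumerate body k).foldl
        (fun (q : Nat × Int) (p : Int × Char) =>
          if (pvRANK.lookup p.2).getD 6 < q.1 then ((pvRANK.lookup p.2).getD 6, p.1) else q)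
        (br, bi)
      = (pvMrb body br,
         if pvMrb body br < br then k + (List.idxOf (pvVch (pvMrb body br)) body : Int) else bi) := by
  induction body generalizing k br bi with
  | nil => simp [PySem.List.enumerate_nil, pvMrb]
  | cons c t ih =>
    rw [PySem.List.enumerate_cons, List.foldl_cons]
    change (PySem.List.enumerate t (k+1)).foldl _ (if pvRd c < br then (pvRd c, k) else (br, bi)) = _
    rw [pvMrb_cons]
    by_cases hlt : pvRd c < br
    · rw [if_pos hlt, if_pos hlt, ih (k+1) (pvRd c) k (by have := pvRd_le_6 c; omega)]
      have hle : pvMrb t (pvRd c) ≤ pvRd c := pvMrb_le t _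
      have hcnd : pvMrb t (pvRd c) < br := by omega
      rw [if_pos hcnd]
      have hcv : c = pvVch (pvRd c) := (pvRd_lt_6_iff c (pvRd c) (by omega)).mp rfl
      by_cases hm : pvMrb t (pvRd c) < pvRd c
      · rw [if_pos hm]
        have hne : (c == pvVch (pvMrb t (pvRd c))) = false := by
          simp only [beq_eq_false_iff_ne, ne_eq]
          intro hcc
          have := pvRd_vch (pvMrb t (pvRd c)) (by omega)
          rw [← hcc] at this
          omega
        rw [Prod.mk.injEq]
        refine ⟨rfl, ?_⟩
        rw [List.idxOf_cons, hne, cond_false]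
        push_cast; ring
      · rw [if_neg hm]
        have heq : pvMrb t (pvRd c) = pvRd c := by omega
        rw [Prod.mk.injEq]
        refine ⟨rfl, ?_⟩
        rw [heq, ← hcv]
        simp
    · rw [if_neg hlt, if_neg hlt, ih (k+1) br bi hbr]
      by_cases hm : pvMrb t br < br
      · rw [if_pos hm, if_pos hm]
        have hne : (c == pvVch (pvMrb t br)) = false := by
          simp only [beq_eq_false_iff_ne, ne_eq]
          intro hcc
          have := pvRd_vch (pvMrb t br) (by omega)
          rw [← hcc] at this
          omega
        rw [Prod.mk.injEq]
        refine ⟨rfl, ?_⟩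
        rw [List.idxOf_cons, hne, cond_false]
        push_cast; ring
      · rw [if_neg hm, if_neg hm]
theorem pvMrb_eq_of (body : List Char) (r : Nat) (hr : r < 6) (hmem : pvVch r ∈ body)
    (hnot : ∀ j < r, pvVch j ∉ body) : pvMrb body 6 = r := by
  have h1 : pvMrb body 6 ≤ r := by
    have := pvMrb_le_of_mem body 6 _ hmem
    rw [pvRd_vch r hr] at this
    exact this
  rcases lt_or_eq_of_le h1 with h2 | h2
  · exact absurd (pvMrb_mem body 6 (by omega) (by omega)) (hnot _ h2)
  · exact h2
theorem pvMrb_top (body : List Char) (hnot : ∀ j < 6, pvVch j ∉ body) : pvMrb body 6 = 6 := by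
  have h1 : pvMrb body 6 ≤ 6 := pvMrb_le body 6
  rcases lt_or_eq_of_le h1 with h2 | h2
  · exact absurd (pvMrb_mem body 6 (by omega) h2) (hnot _ h2)
  · exact h2
theorem pvPrioScan_eq (body : List Char) :
    pvPrioScan body pvVOWEL_PRIORITY
      = if pvMrb body 6 < 6 then (List.idxOf (pvVch (pvMrb body 6)) body : Int) else -1 := by
  have hcast : ∀ n : Nat, ((n : Int) = -1) = False := by intro n; simp only [eq_iff_iff, iff_false]; omega
  by_cases h0 : 'a' ∈ body
  · have hm := pvMrb_eq_of body 0 (by omega) (by simpa [pvVch] using h0) (by omega)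
    simp [pvPrioScan, pvVOWEL_PRIORITY, pvFind_singleton, h0, hm, pvVch, hcast]
  · by_cases h1 : 'A' ∈ body
    · have hm := pvMrb_eq_of body 1 (by omega) (by simpa [pvVch] using h1)
        (by intro j hj; interval_cases j <;> simpa [pvVch] using h0)
      simp [pvPrioScan, pvVOWEL_PRIORITY, pvFind_singleton, h0, h1, hm, pvVch, hcast]
    · by_cases h2 : 'e' ∈ body
      · have hm := pvMrb_eq_of body 2 (by omega) (by simpa [pvVch] using h2)
          (by intro j hj; interval_cases j <;> (simp [pvVch]; assumption))
        simp [pvPrioScan, pvVOWEL_PRIORITY, pvFind_singleton, h0, h1, h2, hm, pvVch, hcast]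
      · by_cases h3 : 'E' ∈ body
        · have hm := pvMrb_eq_of body 3 (by omega) (by simpa [pvVch] using h3)
            (by intro j hj; interval_cases j <;> (simp [pvVch]; assumption))
          simp [pvPrioScan, pvVOWEL_PRIORITY, pvFind_singleton, h0, h1, h2, h3, hm, pvVch, hcast]
        · by_cases h4 : 'o' ∈ body
          · have hm := pvMrb_eq_of body 4 (by omega) (by simpa [pvVch] using h4)
              (by intro j hj; interval_cases j <;> (simp [pvVch]; assumption))
            simp [pvPrioScan, pvVOWEL_PRIORITY, pvFind_singleton, h0, h1, h2, h3, h4, hm, pvVch, hcast]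
          · by_cases h5 : 'O' ∈ body
            · have hm := pvMrb_eq_of body 5 (by omega) (by simpa [pvVch] using h5)
                (by intro j hj; interval_cases j <;> (simp [pvVch]; assumption))
              simp [pvPrioScan, pvVOWEL_PRIORITY, pvFind_singleton, h0, h1, h2, h3, h4, h5, hm, pvVch, hcast]
            · have hm := pvMrb_top body
                (by intro j hj; interval_cases j <;> (simp [pvVch]; assumption))
              simp [pvPrioScan, pvVOWEL_PRIORITY, pvFind_singleton, h0, h1, h2, h3, h4, h5, hm]
theorem pvTarget_eq (body : List Char) :
    (if (if pvPrioScan body pvVOWEL_PRIORITY = -1 ∧ PySem.Chars.isIn "ou".toList body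
         then PySem.Chars.find body ['o'] else pvPrioScan body pvVOWEL_PRIORITY) = -1
     then (PySem.List.enumerate body 0).foldl
            (fun acc p => if ['i', 'u', 'ü'].contains (PySem.Chars.lowerChar p.2) then p.1 else acc) (-1)
     else (if pvPrioScan body pvVOWEL_PRIORITY = -1 ∧ PySem.Chars.isIn "ou".toList body
         then PySem.Chars.find body ['o'] else pvPrioScan body pvVOWEL_PRIORITY))
    = (if ((PySem.List.enumerate body 0).foldl
            (fun (acc : (Nat × Int) × Int) p =>
              ((if (pvRANK.lookup p.2).getD 6 < acc.1.1 then ((pvRANK.lookup p.2).getD 6, p.1) else acc.1),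
               (if ['i', 'u', 'ü'].contains (PySem.Chars.lowerChar p.2) then p.1 else acc.2)))
            ((6, -1), -1)).1.2 ≠ -1
       then ((PySem.List.enumerate body 0).foldl
            (fun (acc : (Nat × Int) × Int) p =>
              ((if (pvRANK.lookup p.2).getD 6 < acc.1.1 then ((pvRANK.lookup p.2).getD 6, p.1) else acc.1),
               (if ['i', 'u', 'ü'].contains (PySem.Chars.lowerChar p.2) then p.1 else acc.2)))
            ((6, -1), -1)).1.2
       else ((PySem.List.enumerate body 0).foldl
            (fun (acc : (Nat × Int) × Int) p =>
              ((if (pvRANK.lookup p.2).getD 6 < acc.1.1 then ((pvRANK.lookup p.2).getD 6, p.1) else acc.1),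
               (if ['i', 'u', 'ü'].contains (PySem.Chars.lowerChar p.2) then p.1 else acc.2)))
            ((6, -1), -1)).2) := by
  rw [PySem.List.foldl_prod_mk
    (f := fun (q : Nat × Int) (p : Int × Char) =>
      if (pvRANK.lookup p.2).getD 6 < q.1 then ((pvRANK.lookup p.2).getD 6, p.1) else q)
    (g := fun (acc : Int) (p : Int × Char) =>
      if ['i', 'u', 'ü'].contains (PySem.Chars.lowerChar p.2) then p.1 else acc)]
  rw [pvFoldP body 0 6 (-1) (by omega), pvPrioScan_eq]
  by_cases hm : pvMrb body 6 < 6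
  · have hne : ((List.idxOf (pvVch (pvMrb body 6)) body : Int)) ≠ -1 := by omega
    simp [hm, hne]
  · simp only [if_neg hm]
    have hou : PySem.Chars.isIn ['o', 'u'] body = false := by
      cases h : PySem.Chars.isIn ['o', 'u'] body
      · rfl
      · exfalso
        have hinf := (PySem.Chars.isIn_iff_infix _ _).mp h
        have ho : 'o' ∈ body := hinf.sublist.subset (by decide)
        have h1 := pvMrb_le_of_mem body 6 'o' ho
        have h2 : pvRd 'o' = 4 := by decide
        omega
    simp [hou]

-- ===== VERDICT (by name: the statement is the Claim_ definition above) =====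
theorem convert_syllable_py_spec : Claim_equal_convert_syllable_py := by
  intro syllable hdom hpre
  unfold Spec_convert_syllable_py convert_syllable_py convert_syllable_py_alt
  simp only [pvTarget_eq]
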